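-- pv_equiv track=rewrite | github.com/solis-team/Hydra | benchmark/DevEval/convert.py | _apply_indentation
-- ===== SOURCE A (Python) =====
-- def _apply_indentation(code: str, indent_str) -> str:
--     """Apply indentation to code."""
--     if isinstance(indent_str, int):
--         indent_str = ' ' * indent_str
--     elif not isinstance(indent_str, str):
--         indent_str = str(indent_str)
--
--     if not code.strip():
--         return code
--
--     lines = code.split('\n')
--     indented_lines = []
--
--     for line in lines:
--         if line.strip():
--             indented_lines.append(indent_str + line)
--         else:
--             indented_lines.append(line)
--
--     return '\n'.join(indented_lines)
-- ===== SOURCE B (Python) =====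
-- def _apply_indentation(code: str, indent_str) -> str:
--     """Apply indentation to code (single character scan with a line buffer)."""
--     if isinstance(indent_str, int):
--         indent_str = ' ' * indent_str
--     elif not isinstance(indent_str, str):
--         indent_str = str(indent_str)
--
--     pieces = []
--     line = []
--     has_content = False
--     for ch in code:
--         if ch == '\n':
--             if has_content:
--                 pieces.append(indent_str)
--             pieces.append(''.join(line))
--             pieces.append('\n')
--             line = []
--             has_content = False
--         else:
--             line.append(ch)
--             if not ch.isspace():
--                 has_content = True
--     if has_content:
--         pieces.append(indent_str)
--     pieces.append(''.join(line))
--     return ''.join(pieces)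
-- ===== Notes on version B (the rewrite author's own statement) =====
-- stated objective: alternative
-- what changed: Replaces split('\n')/per-line loop/'\n'.join (and the redundant whitespace-only early return) with a single character-by-character state machine that buffers the current line and tracks a has_content flag, emitting the indent before each non-blank line as it goes.
import Mathlib
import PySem

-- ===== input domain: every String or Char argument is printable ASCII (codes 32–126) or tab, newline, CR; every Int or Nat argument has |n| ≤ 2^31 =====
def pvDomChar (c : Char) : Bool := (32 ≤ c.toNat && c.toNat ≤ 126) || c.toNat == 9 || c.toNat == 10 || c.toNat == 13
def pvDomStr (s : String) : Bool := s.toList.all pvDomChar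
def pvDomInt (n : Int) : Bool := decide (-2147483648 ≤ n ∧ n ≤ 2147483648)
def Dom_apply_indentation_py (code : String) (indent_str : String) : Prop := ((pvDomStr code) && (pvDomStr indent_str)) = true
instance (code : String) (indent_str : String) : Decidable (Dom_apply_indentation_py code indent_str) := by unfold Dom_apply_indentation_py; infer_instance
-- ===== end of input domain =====

-- B replaces A's split('\n')/per-line loop/'\n'.join (and the redundant whitespace-only early
-- return) by a single character scan with a line buffer and a has_content flag; same return value,
-- alternative structure (no speed claim).

-- ===== PORT A =====
-- A: early return for whitespace-only code, then split on '\n', loop appending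
-- (indent_str + line) for lines with a non-empty strip, else the line, then '\n'.join.
-- (string operations ported at the PySem.Chars layer, exact per PYSEM.md)
def apply_indentation_py (code : String) (indent_str : String) : String :=
  if PySem.Str.strip code = "" then code
  else
    let lines := PySem.Chars.splitOn code.toList ['\n']
    let indented := lines.foldl
      (fun acc line =>
        acc ++ [if PySem.Chars.strip line ≠ [] then indent_str.toList ++ line else line])
      []
    String.ofList (PySem.Chars.join ['\n'] indented)

-- ===== PORT B =====
-- B: one pass over the characters; state = (pieces emitted, current line buffer, has_content flag);
-- on '\n' flush the buffered line (prefixed by the indent when the flag is set), at the end flush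
-- the last line and concatenate the pieces (''.join).
def pvStep (ind : List Char) (st : List (List Char) × List Char × Bool) (ch : Char) :
    List (List Char) × List Char × Bool :=
  if ch = '\n' then
    ((if st.2.2 then st.1 ++ [ind] else st.1) ++ [st.2.1] ++ [['\n']], [], false)
  else
    (st.1, st.2.1 ++ [ch], st.2.2 || !PySem.Chars.isspace ch)

def apply_indentation_py_alt (code : String) (indent_str : String) : String :=
  let st := code.toList.foldl (pvStep indent_str.toList) ([], [], false)
  let pieces := (if st.2.2 then st.1 ++ [indent_str.toList] else st.1) ++ [st.2.1]
  String.ofList (PySem.Chars.join [] pieces)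


-- ===== PRECONDITION & SPEC =====
def Spec_apply_indentation_py (code : String) (indent_str : String) (out : String) : Prop := out = apply_indentation_py_alt code indent_str
instance (code : String) (indent_str : String) (out : String) : Decidable (Spec_apply_indentation_py code indent_str out) := by unfold Spec_apply_indentation_py; infer_instance

-- ===== CLAIM (what is proved, stated in full; the proofs are below) =====
def Claim_equal_apply_indentation_py : Prop := ∀ (code : String) (indent_str : String), Dom_apply_indentation_py code indent_str → Spec_apply_indentation_py code indent_str (apply_indentation_py code indent_str)

-- ===== LEMMAS AND PROOFS =====

def pvSplitNl : List Char → List (List Char)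
  | [] => [[]]
  | c :: t => if c = '\n' then [] :: pvSplitNl t else (pvSplitNl t).modifyHead (c :: ·)

theorem pvGo_spec (fuel : Nat) (l cur : List Char) (acc : List (List Char))
    (h : l.length < fuel) :
    PySem.Chars.splitOn.go ['\n'] fuel l cur acc
      = acc.reverse ++ (pvSplitNl l).modifyHead (cur.reverse ++ ·) := by
  induction fuel generalizing l cur acc with
  | zero => omega
  | succ fuel ih =>
    cases l with
    | nil => simp [PySem.Chars.splitOn.go, pvSplitNl]
    | cons c rest =>
      by_cases hc : c = '\n'
      · subst hc
        rw [PySem.Chars.splitOn.go]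
        simp only [List.isPrefixOf, BEq.rfl, Bool.true_and, if_pos]
        rw [ih _ _ _ (by simpa using Nat.lt_of_succ_lt_succ h)]
        simp [pvSplitNl, List.modifyHead]
        cases pvSplitNl rest <;> rfl
      · rw [PySem.Chars.splitOn.go]
        have : List.isPrefixOf ['\n'] (c :: rest) = false := by
          simp [List.isPrefixOf]; exact fun hh => absurd hh.symm hc
        rw [if_neg (by simp [this])]
        rw [ih _ _ _ (by simpa using Nat.lt_of_succ_lt_succ h)]
        simp [pvSplitNl, hc, List.modifyHead_modifyHead]
        rfl

theorem pvSplitOn_eq (cs : List Char) :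
    PySem.Chars.splitOn cs ['\n'] = pvSplitNl cs := by
  unfold PySem.Chars.splitOn
  rw [pvGo_spec _ _ _ _ (by omega)]
  simp
  cases pvSplitNl cs <;> rfl

theorem pvStrip_nil_iff (l : List Char) :
    PySem.Chars.strip l = [] ↔ ∀ c ∈ l, PySem.Chars.isspace c := by
  unfold PySem.Chars.strip PySem.Chars.rstrip PySem.Chars.lstrip
  rw [List.reverse_eq_nil_iff, List.dropWhile_eq_nil_iff]
  constructor
  · intro h c hc
    by_cases hmem : c ∈ List.dropWhile PySem.Chars.isspace l
    · exact h c (by simpa using hmem)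
    · have := List.takeWhile_append_dropWhile (p := PySem.Chars.isspace) (l := l)
      have hc' : c ∈ List.takeWhile PySem.Chars.isspace l ++ List.dropWhile PySem.Chars.isspace l := by
        rw [this]; exact hc
      rcases List.mem_append.1 hc' with h1 | h1
      · exact List.mem_takeWhile_imp h1
      · exact absurd h1 hmem
  · intro h c hc
    exact h c (by simpa using List.dropWhile_subset _ (by simpa using hc))

theorem pvSplitNl_ne_nil (cs : List Char) : pvSplitNl cs ≠ [] := by
  induction cs with
  | nil => simp [pvSplitNl]
  | cons c t ih =>
    simp only [pvSplitNl]
    split_ifs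
    · simp
    · cases h : pvSplitNl t with
      | nil => exact absurd h ih
      | cons a b => simp

def pvF (ind l : List Char) : List Char :=
  if PySem.Chars.strip l ≠ [] then ind ++ l else l

def pvR (ind cs : List Char) : List Char :=
  PySem.Chars.join ['\n'] ((pvSplitNl cs).map (pvF ind))

theorem pvSplitNl_no_nl (l : List Char) (h : '\n' ∉ l) : pvSplitNl l = [l] := by
  induction l with
  | nil => rfl
  | cons c t ih =>
    have hc : c ≠ '\n' := fun e => h (by simp [e])
    simp [pvSplitNl, hc, ih (fun e => h (by simp [e]))]

theorem pvSplitNl_append (l t : List Char) (h : '\n' ∉ l) :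
    pvSplitNl (l ++ '\n' :: t) = l :: pvSplitNl t := by
  induction l with
  | nil => simp [pvSplitNl]
  | cons c r ih =>
    have hc : c ≠ '\n' := fun e => h (by simp [e])
    simp [pvSplitNl, hc, ih (fun e => h (by simp [e]))]

theorem pvR_nonl (ind l : List Char) (h : '\n' ∉ l) : pvR ind l = pvF ind l := by
  rw [pvR, pvSplitNl_no_nl l h]
  simp [PySem.Chars.join_singleton]

theorem pvR_cons (ind l t : List Char) (h : '\n' ∉ l) :
    pvR ind (l ++ '\n' :: t) = pvF ind l ++ '\n' :: pvR ind t := by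
  rw [pvR, pvSplitNl_append l t h]
  cases ht : pvSplitNl t with
  | nil => exact absurd ht (pvSplitNl_ne_nil t)
  | cons a b =>
    rw [List.map_cons, List.map_cons, PySem.Chars.join_cons_cons]
    simp only [pvR, ht, List.map_cons]
    simp

theorem pvStrip_snoc (l : List Char) (c : Char) (hc : c ≠ '\n') :
    (decide (PySem.Chars.strip (l ++ [c]) ≠ []))
      = (decide (PySem.Chars.strip l ≠ []) || !PySem.Chars.isspace c) := by
  by_cases hspace : PySem.Chars.isspace c
  · by_cases hl : PySem.Chars.strip l = []
    · have : PySem.Chars.strip (l ++ [c]) = [] := by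
        rw [pvStrip_nil_iff] at hl ⊢
        intro d hd
        rcases List.mem_append.1 hd with h1 | h1
        · exact hl d h1
        · simp at h1; subst h1; exact hspace
      simp [this, hl, hspace]
    · have : PySem.Chars.strip (l ++ [c]) ≠ [] := by
        simp only [ne_eq, pvStrip_nil_iff] at hl ⊢
        intro hh; exact hl (fun d hd => hh d (List.mem_append_left _ hd))
      simp [this, hl, hspace]
  · have : PySem.Chars.strip (l ++ [c]) ≠ [] := by
      simp only [ne_eq, pvStrip_nil_iff]
      intro hh; exact hspace (hh c (by simp))
    simp [this, hspace]

theorem pvJoin_nil_eq_flatten (ps : List (List Char)) :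
    PySem.Chars.join [] ps = ps.flatten := by
  induction ps with
  | nil => simp [PySem.Chars.join_nil]
  | cons a b ih =>
    cases b with
    | nil => simp [PySem.Chars.join_singleton]
    | cons x y => rw [PySem.Chars.join_cons_cons]; simp_all

theorem pvB_invariant (ind : List Char) (cs : List Char) :
    ∀ (pieces : List (List Char)) (line : List Char), '\n' ∉ line →
    (let st := cs.foldl (pvStep ind) (pieces, line, decide (PySem.Chars.strip line ≠ []));
      PySem.Chars.join [] ((if st.2.2 then st.1 ++ [ind] else st.1) ++ [st.2.1]))
      = PySem.Chars.join [] pieces ++ pvR ind (line ++ cs) := by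
  induction cs with
  | nil =>
    intro pieces line hline
    simp only [List.foldl_nil, List.append_nil]
    rw [pvR_nonl ind line hline, pvF]
    by_cases hl : PySem.Chars.strip line = [] <;>
      simp [hl, pvJoin_nil_eq_flatten]
  | cons c rest ih =>
    intro pieces line hline
    by_cases hc : c = '\n'
    · subst hc
      simp only [List.foldl_cons, pvStep, if_true]
      have := ih ((if decide (PySem.Chars.strip line ≠ []) then pieces ++ [ind] else pieces) ++ [line] ++ [['\n']]) [] (by simp)
      simp only [decide_eq_true_eq] at this ⊢
      rw [show (decide (PySem.Chars.strip ([] : List Char) ≠ []) = false) by simp [PySem.Chars.strip, PySem.Chars.lstrip, PySem.Chars.rstrip]] at this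
      rw [this, pvR_cons ind line rest hline]
      simp only [pvJoin_nil_eq_flatten, pvF]
      by_cases hl : PySem.Chars.strip line = [] <;> simp [hl]
    · simp only [List.foldl_cons, pvStep, if_neg hc]
      rw [← pvStrip_snoc line c hc]
      have := ih pieces (line ++ [c]) (by
        intro hmem
        rcases List.mem_append.1 hmem with h1 | h1
        · exact hline h1
        · simp at h1; exact hc h1.symm)
      rw [this]
      simp

theorem pvB_eq (ind cs : List Char) :
    (let st := cs.foldl (pvStep ind) ([], [], false);
      PySem.Chars.join [] ((if st.2.2 then st.1 ++ [ind] else st.1) ++ [st.2.1]))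
      = pvR ind cs := by
  have := pvB_invariant ind cs [] [] (by simp)
  simp only [List.nil_append] at this
  rw [show (decide (PySem.Chars.strip ([] : List Char) ≠ []) = false) by simp [PySem.Chars.strip, PySem.Chars.lstrip, PySem.Chars.rstrip]] at this
  rw [this]
  simp [PySem.Chars.join_nil]

theorem pvMem_splitNl (cs : List Char) :
    ∀ l ∈ pvSplitNl cs, ∀ c ∈ l, c ∈ cs := by
  induction cs with
  | nil => intro l hl c hc; simp [pvSplitNl] at hl; subst hl; simp at hc
  | cons a t ih =>
    intro l hl c hc
    by_cases ha : a = '\n'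
    · subst ha
      simp only [pvSplitNl, if_true, List.mem_cons] at hl
      rcases hl with rfl | hl
      · simp at hc
      · exact List.mem_cons_of_mem _ (ih l hl c hc)
    · simp only [pvSplitNl, if_neg ha] at hl
      cases ht : pvSplitNl t with
      | nil => exact absurd ht (pvSplitNl_ne_nil t)
      | cons x y =>
        rw [ht] at hl
        simp only [List.modifyHead, List.mem_cons] at hl
        rcases hl with rfl | hl
        · rcases List.mem_cons.1 hc with rfl | hc'
          · simp
          · exact List.mem_cons_of_mem _ (ih x (by simp [ht]) c hc')
        · exact List.mem_cons_of_mem _ (ih l (by simp [ht, hl]) c hc)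

theorem pvJoin_splitNl (cs : List Char) :
    PySem.Chars.join ['\n'] (pvSplitNl cs) = cs := by
  induction cs with
  | nil => simp [pvSplitNl, PySem.Chars.join_singleton]
  | cons a t ih =>
    by_cases ha : a = '\n'
    · subst ha
      simp only [pvSplitNl, if_true]
      cases ht : pvSplitNl t with
      | nil => exact absurd ht (pvSplitNl_ne_nil t)
      | cons x y =>
        rw [PySem.Chars.join_cons_cons]
        rw [ht] at ih; simp [ih]
    · simp only [pvSplitNl, if_neg ha]
      cases ht : pvSplitNl t with
      | nil => exact absurd ht (pvSplitNl_ne_nil t)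
      | cons x y =>
        simp only [List.modifyHead]
        cases y with
        | nil => rw [ht] at ih; simp_all [PySem.Chars.join_singleton]
        | cons z w =>
          rw [PySem.Chars.join_cons_cons]
          rw [ht, PySem.Chars.join_cons_cons] at ih
          simp [← ih]

theorem pvR_ws (ind cs : List Char) (h : ∀ c ∈ cs, PySem.Chars.isspace c) :
    pvR ind cs = cs := by
  rw [pvR]
  have : (pvSplitNl cs).map (pvF ind) = pvSplitNl cs := by
    have h2 : ∀ l ∈ pvSplitNl cs, pvF ind l = id l := by
      intro l hl
      rw [pvF, if_neg, id]
      simp only [ne_eq, not_not, pvStrip_nil_iff]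
      exact fun c hc => h c (pvMem_splitNl cs l hl c hc)
    rw [List.map_congr_left h2, List.map_id]
  rw [this, pvJoin_splitNl]


-- ===== VERDICT (by name: the statement is the Claim_ definition above) =====
theorem apply_indentation_py_spec : Claim_equal_apply_indentation_py := by
  intro code indent_str _
  unfold Spec_apply_indentation_py
  have hB : apply_indentation_py_alt code indent_str
      = String.ofList (pvR indent_str.toList code.toList) := by
    simp only [apply_indentation_py_alt]
    exact congrArg String.ofList (pvB_eq indent_str.toList code.toList)
  rw [hB, apply_indentation_py]
  by_cases hws : PySem.Str.strip code = ""
  · rw [if_pos hws]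
    have h0 : PySem.Chars.strip code.toList = [] := by
      have := congrArg String.toList hws
      simpa [PySem.Str.toList_strip] using this
    rw [pvR_ws _ _ (pvStrip_nil_iff _ |>.1 h0), String.ofList_toList]
  · rw [if_neg hws]
    simp only [pvSplitOn_eq, PySem.List.foldl_append_singleton_eq_map, List.nil_append]
    rfl
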